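-- pv_equiv track=rewrite | github.com/rishit5/lcgrind | 2832-maximal-range-that-each-element-is-maximum-in-it/2832-maximal-range-that-each-element-is-maximum-in-it.py | maximumLengthOfRanges
-- ===== SOURCE A (Python) =====
-- from typing import List
--
-- def maximumLengthOfRanges(nums: List[int]) -> List[int]:
--     # For finding the max on your left
--
--     left_  = [0] * len(nums)
--     stack = []
--
--     for i in range(len(nums) - 1, -1, -1):
--         n = nums[i]
--         if len(stack) == 0:
--             stack.append(i)
--         else:
--             top = stack[-1]
--             if nums[top] > n:
--                 stack.append(i)
--             else:
--                 while len(stack) > 0 and nums[stack[-1]] < n: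
--                     top = stack.pop()
--                     left_[top] = i
--                 stack.append(i)
--
--     while len(stack) > 0:
--         left_[stack.pop()] = -1
--
--     right_ = [len(nums)-1] * len(nums)
--     stack = []
--     for i, n in enumerate(nums):
--         if len(stack) == 0:
--             stack.append(i)
--         else:
--             top = stack[-1]
--             if nums[top] > n:
--                 stack.append(i)
--             else:
--                 while len(stack) > 0 and nums[stack[-1]] < n:
--                     top = stack.pop()
--                     right_[top] = i
--                 stack.append(i)
--     while len(stack) > 0:
--         right_[stack.pop()] = len(nums)
--     for i in range(len(nums)):
--         nums[i] = right_[i] - left_[i] - 1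
--     return nums
-- ===== SOURCE B (Python) =====
-- from typing import List
--
-- def maximumLengthOfRanges(nums: List[int]) -> List[int]:
--     # Direct O(n^2) scan: for each i, expand left/right past elements <= nums[i].
--     n = len(nums)
--     res = []
--     for i in range(n):
--         v = nums[i]
--         j = i - 1
--         while j >= 0 and nums[j] <= v:
--             j -= 1
--         k = i + 1
--         while k < n and nums[k] <= v:
--             k += 1
--         res.append(k - j - 1)
--     for i in range(n):
--         nums[i] = res[i]
--     return nums
-- ===== Notes on version B (the rewrite author's own statement) =====
-- stated objective: simpler
-- what changed: Replaced the two monotonic-stack passes (building left_/right_ boundary arrays with push/pop and a drain phase) by a direct per-index scan that walks left and right past elements <= nums[i] to find the strictly-greater boundaries.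
import Mathlib
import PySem

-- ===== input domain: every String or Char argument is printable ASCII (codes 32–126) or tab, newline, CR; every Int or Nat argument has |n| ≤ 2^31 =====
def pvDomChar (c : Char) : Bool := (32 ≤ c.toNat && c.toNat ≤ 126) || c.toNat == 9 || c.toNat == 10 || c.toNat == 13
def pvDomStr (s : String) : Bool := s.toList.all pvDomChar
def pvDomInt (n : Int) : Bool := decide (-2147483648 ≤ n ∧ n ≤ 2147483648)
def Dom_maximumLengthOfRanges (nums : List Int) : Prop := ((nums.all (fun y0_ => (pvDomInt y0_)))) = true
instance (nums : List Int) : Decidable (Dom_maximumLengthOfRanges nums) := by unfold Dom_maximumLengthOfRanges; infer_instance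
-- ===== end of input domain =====

-- B replaces the two monotonic-stack passes by a direct per-index left/right scan (simpler; same return value; like A, B rewrites `nums` in place and returns it — equivalence here is about the return value).


-- ===== PORT A =====
-- the inner `while len(stack) > 0 and nums[stack[-1]] < n: top = stack.pop(); arr[top] = i`
def popLoop (nums : List Int) (v : Int) (iv : Int) : List Nat → List Int → List Nat × List Int
  | [], arr => ([], arr)
  | t :: rest, arr =>
    if nums.getD t 0 < v then popLoop nums v iv rest (arr.set t iv)
    else (t :: rest, arr)

-- one iteration of either of A's two (textually identical) stack loops; stack head = top
def stepStack (nums : List Int) (p : List Nat × List Int) (i : Nat) : List Nat × List Int :=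
  let nv := nums.getD i 0
  match p with
  | (st, arr) =>
    match st with
    | [] => ([i], arr)
    | t :: _ =>
      if nums.getD t 0 > nv then (i :: st, arr)
      else
        let q := popLoop nums nv (i : Int) st arr
        (i :: q.1, q.2)

-- the trailing `while len(stack) > 0: arr[stack.pop()] = c`
def drainStack (arr : List Int) (st : List Nat) (c : Int) : List Int :=
  st.foldl (fun a t => a.set t c) arr

def maximumLengthOfRanges (nums : List Int) : List Int :=
  let n := nums.length
  let p1 := ((List.range n).reverse).foldl (stepStack nums) ([], List.replicate n (0 : Int))
  let left_ := drainStack p1.2 p1.1 (-1)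
  let p2 := (List.range n).foldl (stepStack nums) ([], List.replicate n ((n : Int) - 1))
  let right_ := drainStack p2.2 p2.1 (n : Int)
  -- final loop writes right_[i] - left_[i] - 1 into nums and returns nums
  (List.range n).map (fun i => right_.getD i 0 - left_.getD i 0 - 1)

-- ===== PORT B =====
-- `j = i - 1; while j >= 0 and nums[j] <= v: j -= 1`; returns final j
def lbScan (nums : List Int) (v : Int) : Nat → Int
  | 0 => -1
  | j + 1 => if nums.getD j 0 ≤ v then lbScan nums v j else (j : Int)

-- `k = i + 1; while k < n and nums[k] <= v: k += 1`; returns final k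
def rbScan (nums : List Int) (v : Int) (n : Nat) (k : Nat) : Int :=
  if k < n then
    if nums.getD k 0 ≤ v then rbScan nums v n (k + 1) else (k : Int)
  else (n : Int)
termination_by n - k

def maximumLengthOfRanges_alt (nums : List Int) : List Int :=
  let n := nums.length
  -- res built per index, then copied into nums and returned
  (List.range n).map (fun i =>
    let v := nums.getD i 0
    rbScan nums v n (i + 1) - lbScan nums v i - 1)

-- ===== PRECONDITION & SPEC =====
def Spec_maximumLengthOfRanges (nums : List Int) (out : List Int) : Prop := out = maximumLengthOfRanges_alt nums
instance (nums : List Int) (out : List Int) : Decidable (Spec_maximumLengthOfRanges nums out) := by unfold Spec_maximumLengthOfRanges; infer_instance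

-- ===== CLAIM (what is proved, stated in full; the proofs are below) =====
def Claim_equal_maximumLengthOfRanges : Prop := ∀ (nums : List Int), Dom_maximumLengthOfRanges nums → Spec_maximumLengthOfRanges nums (maximumLengthOfRanges nums)

-- ===== LEMMAS AND PROOFS =====

-- getD/set/replicate bridges
theorem pv_getD_set_self (l : List Int) (i : Nat) (a : Int) (h : i < l.length) :
    (l.set i a).getD i 0 = a := by
  simp [List.getD_eq_getElem?_getD, h]

theorem pv_getD_set_ne (l : List Int) (i j : Nat) (a : Int) (h : i ≠ j) :
    (l.set i a).getD j 0 = l.getD j 0 := by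
  simp [List.getD_eq_getElem?_getD, h]

theorem pv_getD_replicate (n i : Nat) (a : Int) (h : i < n) :
    (List.replicate n a).getD i 0 = a := by
  simp [List.getD_eq_getElem?_getD, h]

-- ---------- popLoop characterisation ----------

theorem popLoop_fst_sublist (nums : List Int) (v iv : Int) (st : List Nat) :
    ∀ (arr : List Int), (popLoop nums v iv st arr).1.Sublist st := by
  induction st with
  | nil => intro arr; simp [popLoop]
  | cons t rest ih =>
    intro arr
    simp only [popLoop]
    split
    · exact (ih _).trans (List.sublist_cons_self t rest)
    · exact List.Sublist.refl _

theorem popLoop_len (nums : List Int) (v iv : Int) (st : List Nat) :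
    ∀ (arr : List Int), (popLoop nums v iv st arr).2.length = arr.length := by
  induction st with
  | nil => intro arr; simp [popLoop]
  | cons t rest ih =>
    intro arr
    simp only [popLoop]
    split
    · rw [ih (arr.set t iv), List.length_set]
    · rfl

theorem popLoop_mem (nums : List Int) (v iv : Int) (st : List Nat)
    (hp : List.Pairwise (fun a b => a ≠ b ∧ nums.getD a 0 ≤ nums.getD b 0) st) :
    ∀ (arr : List Int) (j : Nat),
      j ∈ (popLoop nums v iv st arr).1 ↔ j ∈ st ∧ ¬ nums.getD j 0 < v := by
  induction st with
  | nil => intro arr j; simp [popLoop]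
  | cons t rest ih =>
    obtain ⟨hhead, htail⟩ := List.pairwise_cons.mp hp
    intro arr j
    simp only [popLoop]
    split
    · rename_i hlt
      rw [ih htail _ j]
      simp only [List.mem_cons]
      constructor
      · rintro ⟨hj, hn⟩; exact ⟨Or.inr hj, hn⟩
      · rintro ⟨(rfl | hj), hn⟩
        · exact absurd hlt hn
        · exact ⟨hj, hn⟩
    · rename_i hnlt
      simp only [List.mem_cons]
      constructor
      · intro hj
        refine ⟨hj, ?_⟩
        rcases hj with rfl | hj
        · exact hnlt
        · have := (hhead j hj).2; omega
      · rintro ⟨hj, _⟩; exact hj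

theorem popLoop_getD (nums : List Int) (v iv : Int) (st : List Nat)
    (hp : List.Pairwise (fun a b => a ≠ b ∧ nums.getD a 0 ≤ nums.getD b 0) st) :
    ∀ (arr : List Int), (∀ t ∈ st, t < arr.length) → ∀ (j : Nat),
      ((popLoop nums v iv st arr).2).getD j 0 =
        if j ∈ st ∧ nums.getD j 0 < v then iv else arr.getD j 0 := by
  induction st with
  | nil => intro arr _ j; simp [popLoop]
  | cons t rest ih =>
    obtain ⟨hhead, htail⟩ := List.pairwise_cons.mp hp
    intro arr hlen j
    simp only [popLoop]
    split
    · rename_i hlt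
      rw [ih htail (arr.set t iv)
            (fun s hs => by rw [List.length_set]; exact hlen s (List.mem_cons_of_mem _ hs)) j]
      by_cases hj1 : j ∈ rest ∧ nums.getD j 0 < v
      · rw [if_pos hj1, if_pos ⟨List.mem_cons_of_mem _ hj1.1, hj1.2⟩]
      · rw [if_neg hj1]
        by_cases hjt : j = t
        · subst hjt
          rw [if_pos ⟨List.mem_cons_self, hlt⟩,
              pv_getD_set_self _ _ _ (hlen j List.mem_cons_self)]
        · rw [pv_getD_set_ne _ _ _ _ (fun e => hjt e.symm), if_neg ?_]
          rintro ⟨hj, hv⟩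
          rcases List.mem_cons.mp hj with rfl | hj
          · exact hjt rfl
          · exact hj1 ⟨hj, hv⟩
    · rename_i hnlt
      rw [if_neg ?_]
      rintro ⟨hj, hv⟩
      rcases List.mem_cons.mp hj with rfl | hj
      · exact hnlt hv
      · have := (hhead j hj).2; omega

-- stepStack collapses to "pop then push" in all three of A's branches
theorem stepStack_eq (nums : List Int) (st : List Nat) (arr : List Int) (i : Nat) :
    stepStack nums (st, arr) i =
      ((i : Nat) :: (popLoop nums (nums.getD i 0) (i : Int) st arr).1,
       (popLoop nums (nums.getD i 0) (i : Int) st arr).2) := by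
  cases st with
  | nil => rfl
  | cons t rest =>
    show (if nums.getD t 0 > nums.getD i 0 then _ else _) = _
    by_cases h : nums.getD t 0 > nums.getD i 0
    · rw [if_pos h, popLoop, if_neg (show ¬ nums.getD t 0 < nums.getD i 0 by omega)]
    · rw [if_neg h]

-- drain: every index still on the stack gets c
theorem drain_getD (st : List Nat) :
    ∀ (arr : List Int) (c : Int), (∀ t ∈ st, t < arr.length) → ∀ (j : Nat),
      (drainStack arr st c).getD j 0 = if j ∈ st then c else arr.getD j 0 := by
  induction st with
  | nil => intro arr c _ j; simp [drainStack]
  | cons t rest ih =>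
    intro arr c hlen j
    have : drainStack arr (t :: rest) c = drainStack (arr.set t c) rest c := rfl
    rw [this, ih (arr.set t c) c
          (fun s hs => by rw [List.length_set]; exact hlen s (List.mem_cons_of_mem _ hs)) j]
    by_cases hj1 : j ∈ rest
    · rw [if_pos hj1, if_pos (List.mem_cons_of_mem _ hj1)]
    · rw [if_neg hj1]
      by_cases hjt : j = t
      · subst hjt
        rw [if_pos List.mem_cons_self, pv_getD_set_self _ _ _ (hlen j List.mem_cons_self)]
      · rw [pv_getD_set_ne _ _ _ _ (fun e => hjt e.symm), if_neg ?_]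
        intro hj
        rcases List.mem_cons.mp hj with rfl | hj
        · exact hjt rfl
        · exact hj1 hj

-- ---------- invariant for the forward (right_) pass ----------

def InvR (nums : List Int) (m : Nat) (st : List Nat) (arr : List Int) : Prop :=
  arr.length = nums.length ∧
  List.Pairwise (fun a b => b < a ∧ nums.getD a 0 ≤ nums.getD b 0) st ∧
  (∀ j ∈ st, j < m) ∧
  (∀ j, j < m → (j ∈ st ↔ ∀ t, j < t → t < m → nums.getD t 0 ≤ nums.getD j 0)) ∧
  (∀ j, j < nums.length → j ∉ st → m ≤ j → arr.getD j 0 = (nums.length : Int) - 1) ∧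
  (∀ j ∈ st, arr.getD j 0 = (nums.length : Int) - 1) ∧
  (∀ j, j < m → j ∉ st →
     ∃ t, j < t ∧ t < m ∧ nums.getD j 0 < nums.getD t 0 ∧
          (∀ s, j < s → s < t → nums.getD s 0 ≤ nums.getD j 0) ∧ arr.getD j 0 = (t : Int))

theorem stepR_preserve (nums : List Int) (m : Nat) (st : List Nat) (arr : List Int)
    (hm : m < nums.length) (h : InvR nums m st arr) :
    InvR nums (m + 1) (stepStack nums (st, arr) m).1 (stepStack nums (st, arr) m).2 := by
  obtain ⟨h1, h2, h3, h4, h5, h6, h7⟩ := h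
  have hne : List.Pairwise (fun a b => a ≠ b ∧ nums.getD a 0 ≤ nums.getD b 0) st :=
    h2.imp (fun hab => ⟨hab.1.ne', hab.2⟩)
  have hlen : ∀ t ∈ st, t < arr.length := fun t ht => by
    have := h3 t ht; omega
  rw [stepStack_eq]
  have hmem := popLoop_mem nums (nums.getD m 0) (m : Int) st hne arr
  have hget := popLoop_getD nums (nums.getD m 0) (m : Int) st hne arr hlen
  have hsub := popLoop_fst_sublist nums (nums.getD m 0) (m : Int) st arr
  have hqlen := popLoop_len nums (nums.getD m 0) (m : Int) st arr
  set q1 := (popLoop nums (nums.getD m 0) (m : Int) st arr).1 with hq1def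
  set q2 := (popLoop nums (nums.getD m 0) (m : Int) st arr).2 with hq2def
  have hq1st : ∀ j ∈ q1, j ∈ st := fun j hj => hsub.subset hj
  have hmnotst : m ∉ st := fun hc => absurd (h3 m hc) (by omega)
  refine ⟨?_, ?_, ?_, ?_, ?_, ?_, ?_⟩
  · rw [hqlen, h1]
  · refine List.Pairwise.cons ?_ (h2.sublist hsub)
    intro b hb
    have hbst := hq1st b hb
    have hbv := ((hmem b).mp hb).2
    exact ⟨h3 b hbst, by omega⟩
  · intro j hj
    rcases List.mem_cons.mp hj with rfl | hj
    · omega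
    · have := h3 j (hq1st j hj); omega
  · intro j hj
    constructor
    · intro hmem' t hjt htm1
      rcases List.mem_cons.mp hmem' with rfl | hq
      · omega
      · obtain ⟨hst, hnlt⟩ := (hmem j).mp hq
        by_cases ht : t = m
        · subst ht; omega
        · exact (h4 j (h3 _ hst)).mp hst t hjt (by omega)
    · intro hall
      by_cases hjm : j = m
      · subst hjm; exact List.mem_cons_self
      · have hjm' : j < m := by omega
        have hjst : j ∈ st := (h4 j hjm').mpr (fun t ha hb => hall t ha (by omega))
        have hv : nums.getD m 0 ≤ nums.getD j 0 := hall m hjm' (by omega)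
        exact List.mem_cons_of_mem _ ((hmem j).mpr ⟨hjst, by omega⟩)
  · intro j hjn hjnot hj
    rw [hget j, if_neg (fun hc => by have := h3 j hc.1; omega)]
    exact h5 j hjn (fun hc => by have := h3 j hc; omega) (by omega)
  · intro j hjm
    rcases List.mem_cons.mp hjm with rfl | hq
    · rw [hget j, if_neg (fun hc => hmnotst hc.1)]
      exact h5 j hm hmnotst (le_refl _)
    · obtain ⟨hst, hnlt⟩ := (hmem j).mp hq
      rw [hget j, if_neg (fun hc => hnlt hc.2)]
      exact h6 j hst
  · intro j hj hjnot
    have hjm : j ≠ m := fun e => hjnot (e ▸ List.mem_cons_self)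
    have hj' : j < m := by omega
    have hq1 : j ∉ q1 := fun hq => hjnot (List.mem_cons_of_mem _ hq)
    by_cases hst : j ∈ st
    · have hlt : nums.getD j 0 < nums.getD m 0 := by
        by_contra hc
        exact hq1 ((hmem j).mpr ⟨hst, by omega⟩)
      refine ⟨m, hj', by omega, hlt, ?_, ?_⟩
      · intro s hjs hsm; exact (h4 j hj').mp hst s hjs hsm
      · rw [hget j, if_pos ⟨hst, hlt⟩]
    · obtain ⟨t, ht1, ht2, ht3, ht4, ht5⟩ := h7 j hj' hst
      refine ⟨t, ht1, by omega, ht3, ht4, ?_⟩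
      rw [hget j, if_neg (fun hc => hst hc.1)]
      exact ht5

theorem invR_init (nums : List Int) :
    InvR nums 0 [] (List.replicate nums.length ((nums.length : Int) - 1)) := by
  refine ⟨List.length_replicate, List.Pairwise.nil, ?_, ?_, ?_, ?_, ?_⟩
  · intro j hj; cases hj
  · intro j hj; omega
  · intro j hjn _ _; exact pv_getD_replicate _ _ _ hjn
  · intro j hj; cases hj
  · intro j hj; omega

theorem foldR (nums : List Int) :
    ∀ (k m : Nat) (st : List Nat) (arr : List Int), m + k ≤ nums.length → InvR nums m st arr →
      InvR nums (m + k) (((List.range' m k).foldl (stepStack nums) (st, arr)).1)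
        (((List.range' m k).foldl (stepStack nums) (st, arr)).2) := by
  intro k
  induction k with
  | zero => intro m st arr _ h; simpa using h
  | succ k ih =>
    intro m st arr hk h
    have hrange : List.range' m (k + 1) = m :: List.range' (m + 1) k := by simp [List.range']
    rw [hrange]
    have hstep := stepR_preserve nums m st arr (by omega) h
    have := ih (m + 1) (stepStack nums (st, arr) m).1 (stepStack nums (st, arr) m).2
      (by omega) hstep
    simpa [Nat.add_assoc, Nat.add_comm 1 k] using this

-- ---------- invariant for the backward (left_) pass ----------

def InvL (nums : List Int) (q : Nat) (st : List Nat) (arr : List Int) : Prop :=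
  arr.length = nums.length ∧
  List.Pairwise (fun a b => a < b ∧ nums.getD a 0 ≤ nums.getD b 0) st ∧
  (∀ j ∈ st, q ≤ j ∧ j < nums.length) ∧
  (∀ j, q ≤ j → j < nums.length → (j ∈ st ↔ ∀ t, q ≤ t → t < j → nums.getD t 0 ≤ nums.getD j 0)) ∧
  (∀ j, j < q → arr.getD j 0 = 0) ∧
  (∀ j ∈ st, arr.getD j 0 = 0) ∧
  (∀ j, q ≤ j → j < nums.length → j ∉ st →
     ∃ t, q ≤ t ∧ t < j ∧ nums.getD j 0 < nums.getD t 0 ∧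
          (∀ s, t < s → s < j → nums.getD s 0 ≤ nums.getD j 0) ∧ arr.getD j 0 = (t : Int))

theorem stepL_preserve (nums : List Int) (q : Nat) (st : List Nat) (arr : List Int)
    (hq : q < nums.length) (h : InvL nums (q + 1) st arr) :
    InvL nums q (stepStack nums (st, arr) q).1 (stepStack nums (st, arr) q).2 := by
  obtain ⟨h1, h2, h3, h4, h5, h6, h7⟩ := h
  have hne : List.Pairwise (fun a b => a ≠ b ∧ nums.getD a 0 ≤ nums.getD b 0) st :=
    h2.imp (fun hab => ⟨hab.1.ne, hab.2⟩)
  have hlen : ∀ t ∈ st, t < arr.length := fun t ht => by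
    have := (h3 t ht).2; omega
  rw [stepStack_eq]
  have hmem := popLoop_mem nums (nums.getD q 0) (q : Int) st hne arr
  have hget := popLoop_getD nums (nums.getD q 0) (q : Int) st hne arr hlen
  have hsub := popLoop_fst_sublist nums (nums.getD q 0) (q : Int) st arr
  have hqlen := popLoop_len nums (nums.getD q 0) (q : Int) st arr
  set q1 := (popLoop nums (nums.getD q 0) (q : Int) st arr).1 with hq1def
  set q2 := (popLoop nums (nums.getD q 0) (q : Int) st arr).2 with hq2def
  have hq1st : ∀ j ∈ q1, j ∈ st := fun j hj => hsub.subset hj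
  have hqnotst : q ∉ st := fun hc => absurd ((h3 q hc).1) (by omega)
  refine ⟨?_, ?_, ?_, ?_, ?_, ?_, ?_⟩
  · rw [hqlen, h1]
  · refine List.Pairwise.cons ?_ (h2.sublist hsub)
    intro b hb
    have hbst := hq1st b hb
    have hbv := ((hmem b).mp hb).2
    exact ⟨by have := (h3 b hbst).1; omega, by omega⟩
  · intro j hj
    rcases List.mem_cons.mp hj with rfl | hj
    · exact ⟨le_refl _, hq⟩
    · have := h3 j (hq1st j hj); omega
  · intro j hjq hjn
    constructor
    · intro hmem' t hqt htj
      rcases List.mem_cons.mp hmem' with rfl | hmem''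
      · omega
      · obtain ⟨hst, hnlt⟩ := (hmem j).mp hmem''
        by_cases ht : t = q
        · subst ht; omega
        · exact (h4 j (by have := (h3 j hst).1; omega) hjn).mp hst t (by omega) htj
    · intro hall
      by_cases hjq' : j = q
      · subst hjq'; exact List.mem_cons_self
      · have hjq'' : q + 1 ≤ j := by omega
        have hjst : j ∈ st := (h4 j hjq'' hjn).mpr (fun t ha hb => hall t (by omega) hb)
        have hv : nums.getD q 0 ≤ nums.getD j 0 := hall q (le_refl _) (by omega)
        exact List.mem_cons_of_mem _ ((hmem j).mpr ⟨hjst, by omega⟩)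
  · intro j hj
    rw [hget j, if_neg (fun hc => by have := (h3 j hc.1).1; omega)]
    exact h5 j (by omega)
  · intro j hjm
    rcases List.mem_cons.mp hjm with rfl | hmem''
    · rw [hget j, if_neg (fun hc => hqnotst hc.1)]
      exact h5 j (by omega)
    · obtain ⟨hst, hnlt⟩ := (hmem j).mp hmem''
      rw [hget j, if_neg (fun hc => hnlt hc.2)]
      exact h6 j hst
  · intro j hjq hjn hjnot
    have hjq' : j ≠ q := fun e => hjnot (e ▸ List.mem_cons_self)
    have hj1 : q + 1 ≤ j := by omega
    have hq1' : j ∉ q1 := fun hc => hjnot (List.mem_cons_of_mem _ hc)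
    by_cases hst : j ∈ st
    · have hlt : nums.getD j 0 < nums.getD q 0 := by
        by_contra hc
        exact hq1' ((hmem j).mpr ⟨hst, by omega⟩)
      refine ⟨q, le_refl _, by omega, hlt, ?_, ?_⟩
      · intro s hqs hsj; exact (h4 j hj1 hjn).mp hst s (by omega) hsj
      · rw [hget j, if_pos ⟨hst, hlt⟩]
    · obtain ⟨t, ht1, ht2, ht3, ht4, ht5⟩ := h7 j hj1 hjn hst
      refine ⟨t, by omega, ht2, ht3, ht4, ?_⟩
      rw [hget j, if_neg (fun hc => hst hc.1)]
      exact ht5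

theorem invL_init (nums : List Int) :
    InvL nums nums.length [] (List.replicate nums.length (0 : Int)) := by
  refine ⟨List.length_replicate, List.Pairwise.nil, ?_, ?_, ?_, ?_, ?_⟩
  · intro j hj; cases hj
  · intro j hj hj2; omega
  · intro j hj; exact pv_getD_replicate _ _ _ hj
  · intro j hj; cases hj
  · intro j hj hj2; omega

theorem foldL (nums : List Int) :
    ∀ (q : Nat) (st : List Nat) (arr : List Int), q ≤ nums.length → InvL nums q st arr →
      InvL nums 0 ((((List.range q).reverse).foldl (stepStack nums) (st, arr)).1)
        ((((List.range q).reverse).foldl (stepStack nums) (st, arr)).2) := by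
  intro q
  induction q with
  | zero => intro st arr _ h; simpa using h
  | succ q ih =>
    intro st arr hk h
    have hrange : (List.range (q + 1)).reverse = q :: (List.range q).reverse := by
      rw [List.range_succ, List.reverse_append]; simp
    rw [hrange]
    have hstep := stepL_preserve nums q st arr (by omega) h
    exact ih (stepStack nums (st, arr) q).1 (stepStack nums (st, arr) q).2 (by omega) hstep

-- ---------- B's scans compute the boundaries ----------

theorem lbScan_none (nums : List Int) (v : Int) :
    ∀ (i : Nat), (∀ t, t < i → nums.getD t 0 ≤ v) → lbScan nums v i = -1 := by
  intro i
  induction i with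
  | zero => intro _; rfl
  | succ i ih =>
    intro h
    rw [lbScan, if_pos (h i (by omega))]
    exact ih (fun t ht => h t (by omega))

theorem lbScan_some (nums : List Int) (v : Int) :
    ∀ (i t : Nat), t < i → v < nums.getD t 0 →
      (∀ s, t < s → s < i → nums.getD s 0 ≤ v) → lbScan nums v i = (t : Int) := by
  intro i
  induction i with
  | zero => intro t ht; omega
  | succ i ih =>
    intro t ht hv hall
    by_cases hti : t = i
    · subst hti
      rw [lbScan, if_neg (show ¬ nums.getD t 0 ≤ v by omega)]
    · rw [lbScan, if_pos (hall i (by omega) (by omega))]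
      exact ih t (by omega) hv (fun s hs1 hs2 => hall s hs1 (by omega))

theorem rbScan_none (nums : List Int) (v : Int) (n : Nat) :
    ∀ (d k : Nat), n - k = d → (∀ t, k ≤ t → t < n → nums.getD t 0 ≤ v) →
      rbScan nums v n k = (n : Int) := by
  intro d
  induction d with
  | zero =>
    intro k hk _
    rw [rbScan, if_neg (by omega)]
  | succ d ih =>
    intro k hk h
    rw [rbScan, if_pos (by omega), if_pos (h k (le_refl _) (by omega))]
    exact ih (k + 1) (by omega) (fun t ht1 ht2 => h t (by omega) ht2)

theorem rbScan_some (nums : List Int) (v : Int) (n : Nat) :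
    ∀ (d k t : Nat), t - k = d → k ≤ t → t < n → v < nums.getD t 0 →
      (∀ s, k ≤ s → s < t → nums.getD s 0 ≤ v) → rbScan nums v n k = (t : Int) := by
  intro d
  induction d with
  | zero =>
    intro k t hd hk ht hv _
    have : k = t := by omega
    subst this
    rw [rbScan, if_pos (by omega), if_neg (by omega)]
  | succ d ih =>
    intro k t hd hk ht hv hall
    have hkt : k < t := by omega
    rw [rbScan, if_pos (by omega), if_pos (hall k (le_refl _) hkt)]
    exact ih (k + 1) t (by omega) (by omega) ht hv (fun s hs1 hs2 => hall s (by omega) hs2)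

-- ---------- per-index characterisations of A's two arrays ----------

theorem right_getD (nums : List Int) (j : Nat) (hj : j < nums.length) :
    (drainStack
        (((List.range nums.length).foldl (stepStack nums)
            ([], List.replicate nums.length ((nums.length : Int) - 1))).2)
        (((List.range nums.length).foldl (stepStack nums)
            ([], List.replicate nums.length ((nums.length : Int) - 1))).1)
        (nums.length : Int)).getD j 0
      = rbScan nums (nums.getD j 0) nums.length (j + 1) := by
  have hfold := foldR nums nums.length 0 [] (List.replicate nums.length ((nums.length : Int) - 1))
    (by omega) (invR_init nums)
  rw [List.range_eq_range'] at *
  set p := (List.range' 0 nums.length).foldl (stepStack nums)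
    ([], List.replicate nums.length ((nums.length : Int) - 1)) with hp
  simp only [Nat.zero_add] at hfold
  obtain ⟨h1, h2, h3, h4, h5, h6, h7⟩ := hfold
  have hdrain := drain_getD p.1 p.2 (nums.length : Int)
    (fun t ht => by have := h3 t ht; omega) j
  rw [hdrain]
  by_cases hex : ∃ t, j < t ∧ t < nums.length ∧ nums.getD j 0 < nums.getD t 0
  · obtain ⟨t0, hex1, hex2, hex3⟩ := hex
    have hjnot : j ∉ p.1 := fun hc => by
      have := (h4 j hj).mp hc t0 hex1 hex2; omega
    rw [if_neg hjnot]
    obtain ⟨t, ht1, ht2, ht3, ht4, ht5⟩ := h7 j hj hjnot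
    rw [ht5]
    exact (rbScan_some nums (nums.getD j 0) nums.length (t - (j + 1)) (j + 1) t rfl
      (by omega) ht2 ht3 (fun s hs1 hs2 => ht4 s (by omega) hs2)).symm
  · push Not at hex
    have hjin : j ∈ p.1 := (h4 j hj).mpr (fun t ht1 ht2 => hex t ht1 ht2)
    rw [if_pos hjin]
    exact (rbScan_none nums (nums.getD j 0) nums.length (nums.length - (j + 1)) (j + 1) rfl
      (fun t ht1 ht2 => hex t (by omega) ht2)).symm

theorem left_getD (nums : List Int) (j : Nat) (hj : j < nums.length) :
    (drainStack
        ((((List.range nums.length).reverse).foldl (stepStack nums)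
            ([], List.replicate nums.length (0 : Int))).2)
        ((((List.range nums.length).reverse).foldl (stepStack nums)
            ([], List.replicate nums.length (0 : Int))).1)
        (-1 : Int)).getD j 0
      = lbScan nums (nums.getD j 0) j := by
  have hfold := foldL nums nums.length [] (List.replicate nums.length (0 : Int))
    (le_refl _) (invL_init nums)
  set p := ((List.range nums.length).reverse).foldl (stepStack nums)
    ([], List.replicate nums.length (0 : Int)) with hp
  obtain ⟨h1, h2, h3, h4, h5, h6, h7⟩ := hfold
  have hdrain := drain_getD p.1 p.2 (-1 : Int)
    (fun t ht => by have := (h3 t ht).2; omega) j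
  rw [hdrain]
  by_cases hex : ∃ t, t < j ∧ nums.getD j 0 < nums.getD t 0
  · obtain ⟨t0, hex1, hex2⟩ := hex
    have hjnot : j ∉ p.1 := fun hc => by
      have := (h4 j (by omega) hj).mp hc t0 (by omega) hex1; omega
    rw [if_neg hjnot]
    obtain ⟨t, ht1, ht2, ht3, ht4, ht5⟩ := h7 j (by omega) hj hjnot
    rw [ht5]
    exact (lbScan_some nums (nums.getD j 0) j t ht2 ht3 ht4).symm
  · push Not at hex
    have hjin : j ∈ p.1 := (h4 j (by omega) hj).mpr (fun t _ ht2 => hex t ht2)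
    rw [if_pos hjin]
    exact (lbScan_none nums (nums.getD j 0) j (fun t ht => hex t ht)).symm


-- ===== VERDICT (by name: the statement is the Claim_ definition above) =====
theorem maximumLengthOfRanges_spec : Claim_equal_maximumLengthOfRanges := by
  intro nums _
  show maximumLengthOfRanges nums = maximumLengthOfRanges_alt nums
  simp only [maximumLengthOfRanges, maximumLengthOfRanges_alt]
  apply List.map_congr_left
  intro i hi
  have hi' : i < nums.length := List.mem_range.mp hi
  rw [right_getD nums i hi', left_getD nums i hi']
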